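-- pv_equiv track=rewrite | github.com/fff311/homework2 | hw_3/__init__.py | distribute_books
-- ===== SOURCE A (Python) =====
-- def distribute_books(book, user):
--     num_book = len(book)
--     num_user = len(user)
--     base_book = num_book // num_user
--     remainder = num_book % num_user
--     distribution = []
--     start = 0
--     for i in range(num_user):
--         end = start + base_book + (1 if i < remainder else 0)
--         distribution.append(book[start:end])
--         start = end
--     return distribution
-- ===== SOURCE B (Python) =====
-- def distribute_books(book, user):
--     base = len(book) // len(user)
--     rem = len(book) % len(user)
--     return [book[i * base + min(i, rem):(i + 1) * base + min(i + 1, rem)]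
--             for i in range(len(user))]
-- ===== Notes on version B (the rewrite author's own statement) =====
-- stated objective: simpler
-- what changed: Replaced the loop-carried running start offset with a closed-form bound for each chunk (start_i = i*base + min(i, rem)), so each slice is computed independently in a comprehension.
import Mathlib
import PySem

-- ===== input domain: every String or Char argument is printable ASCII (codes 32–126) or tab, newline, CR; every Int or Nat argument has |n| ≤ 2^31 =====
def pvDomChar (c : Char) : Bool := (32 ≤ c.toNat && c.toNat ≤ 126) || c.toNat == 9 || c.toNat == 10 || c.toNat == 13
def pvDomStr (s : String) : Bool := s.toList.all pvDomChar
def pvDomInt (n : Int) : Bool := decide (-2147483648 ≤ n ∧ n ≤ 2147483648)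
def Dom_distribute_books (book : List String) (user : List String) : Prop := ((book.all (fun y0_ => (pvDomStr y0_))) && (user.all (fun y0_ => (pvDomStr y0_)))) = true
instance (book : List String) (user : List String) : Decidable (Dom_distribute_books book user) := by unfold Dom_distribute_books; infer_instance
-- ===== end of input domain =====

-- B replaces A's loop-carried running start offset with a closed-form bound per chunk (simpler decomposition, same cost);
-- Pre_ excludes empty user, where A raises ZeroDivisionError.


-- ===== PORT A =====
def distribute_books (book : List String) (user : List String) : List (List String) :=
  let num_book : Int := book.length
  let num_user : Int := user.length
  let base_book := PySem.Int.floordiv num_book num_user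
  let remainder := PySem.Int.mod num_book num_user
  let st := (PySem.List.pyRange 0 num_user 1).foldl
    (fun (st : List (List String) × Int) i =>
      let e := st.2 + base_book + (if i < remainder then 1 else 0)
      (st.1 ++ [PySem.List.slice book (some st.2) (some e)], e))
    ([], 0)
  st.1

-- ===== PORT B =====
def distribute_books_alt (book : List String) (user : List String) : List (List String) :=
  let base := PySem.Int.floordiv (book.length : Int) (user.length : Int)
  let rem := PySem.Int.mod (book.length : Int) (user.length : Int)
  (PySem.List.pyRange 0 (user.length : Int) 1).map
    (fun i => PySem.List.slice book (some (i * base + min i rem))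
                                    (some ((i + 1) * base + min (i + 1) rem)))

-- ===== PRECONDITION & SPEC =====
-- Pre_ excludes exactly empty user, where A raises ZeroDivisionError.
def Pre_distribute_books (book : List String) (user : List String) : Prop := user ≠ []
instance (book : List String) (user : List String) : Decidable (Pre_distribute_books book user) := by unfold Pre_distribute_books; infer_instance
def pvWitness_distribute_books : List String × List String := (["a", "b", "c"], ["u", "v"])

def Spec_distribute_books (book : List String) (user : List String) (out : List (List String)) : Prop := out = distribute_books_alt book user
instance (book : List String) (user : List String) (out : List (List String)) : Decidable (Spec_distribute_books book user out) := by unfold Spec_distribute_books; infer_instance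

-- ===== CLAIM (what is proved, stated in full; the proofs are below) =====
def Claim_equal_distribute_books : Prop := ∀ (book : List String) (user : List String), Dom_distribute_books book user → Pre_distribute_books book user → Spec_distribute_books book user (distribute_books book user)

-- ===== LEMMAS AND PROOFS =====

lemma pv_end_eq (base r i : Int) :
    i * base + min i r + (base + (if i < r then 1 else 0)) = (i + 1) * base + min (i + 1) r := by
  have h : (i + 1) * base = i * base + base := by ring
  rw [h]; split_ifs with hi <;> omega

lemma pv_loop_inv (book : List String) (base r : Int) (hr : 0 ≤ r) (k : Nat) :
    (PySem.List.pyRange 0 (k : Int) 1).foldl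
      (fun (st : List (List String) × Int) i =>
        (st.1 ++ [PySem.List.slice book (some st.2) (some (st.2 + base + (if i < r then 1 else 0)))],
         st.2 + base + (if i < r then 1 else 0)))
      ([], 0)
    = ((PySem.List.pyRange 0 (k : Int) 1).map
         (fun i => PySem.List.slice book (some (i * base + min i r))
                                        (some ((i + 1) * base + min (i + 1) r))),
       (k : Int) * base + min (k : Int) r) := by
  induction k with
  | zero =>
      simp [PySem.List.pyRange_one_eq_nil (le_refl 0), min_eq_left hr]
  | succ k ih =>
      have hcast : ((k + 1 : Nat) : Int) = (k : Int) + 1 := by push_cast; ring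
      rw [hcast, PySem.List.pyRange_one_succ_right (Int.natCast_nonneg k),
          List.foldl_append, List.map_append, ih]
      simp only [List.foldl_cons, List.foldl_nil, List.map_cons, List.map_nil]
      refine Prod.ext ?_ ?_ <;> · simp only []; rw [add_assoc, pv_end_eq]

-- ===== VERDICT (by name: the statement is the Claim_ definition above) =====
theorem distribute_books_spec : Claim_equal_distribute_books := by
  intro book user _ hpre
  unfold Spec_distribute_books distribute_books distribute_books_alt
  simp only []
  have hn : 0 < user.length := List.length_pos_iff.mpr hpre
  have hr : 0 ≤ PySem.Int.mod (book.length : Int) (user.length : Int) := by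
    rw [PySem.Int.mod_natCast]; exact Int.natCast_nonneg _
  rw [pv_loop_inv book _ _ hr user.length]
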